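-- pv_equiv track=rewrite | github.com/LFesser97/Predoc | language_change/content_words.py | get_n_gram_dict
-- ===== SOURCE A (Python) =====
-- def get_n_gram_dict(list_of_strings: list) -> dict:
--     """
--     Given a list of strings, return a dictionary with the integers from 1
--     to the length of the longest n-gram as keys, and the number of n-grams
--     of length i as values.
--     """
--     # create a dictionary with the integers from 1 to the length of the longest n-gram as keys
--     # and the number of n-grams of length i as values
--     n_gram_dict = {}
--
--     # for each string in the list of strings
--     for string in list_of_strings:
--         # for each n-gram in the string
--         for i in range(1, len(string.split()) + 1):
--             # if the length of the n-gram is not in the dictionary, add it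
--             if i not in n_gram_dict:
--                 n_gram_dict[i] = 1
--             # if the length of the n-gram is in the dictionary, increase its count by 1
--             else:
--                 n_gram_dict[i] += 1
--
--     return n_gram_dict
-- ===== SOURCE B (Python) =====
-- def get_n_gram_dict(list_of_strings: list) -> dict:
--     """Histogram of word-counts, then one descending suffix-sum pass:
--     key i maps to the number of strings with at least i words."""
--     counts = [len(s.split()) for s in list_of_strings]
--     m = 0
--     for c in counts:
--         if c > m:
--             m = c
--     hist = {}
--     for c in counts:
--         hist[c] = hist.get(c, 0) + 1
--     items = []
--     suffix = 0
--     for i in range(m, 0, -1):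
--         suffix += hist.get(i, 0)
--         items.append((i, suffix))
--     return dict(reversed(items))
-- ===== Notes on version B (the rewrite author's own statement) =====
-- stated objective: faster
-- what changed: Instead of incrementing a dict entry for every key 1..wordcount of every string (O(sum of word counts) dict updates), B builds a histogram of word counts in one pass and turns it into the answer with a single descending suffix-sum pass over 1..max.
import Mathlib
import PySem

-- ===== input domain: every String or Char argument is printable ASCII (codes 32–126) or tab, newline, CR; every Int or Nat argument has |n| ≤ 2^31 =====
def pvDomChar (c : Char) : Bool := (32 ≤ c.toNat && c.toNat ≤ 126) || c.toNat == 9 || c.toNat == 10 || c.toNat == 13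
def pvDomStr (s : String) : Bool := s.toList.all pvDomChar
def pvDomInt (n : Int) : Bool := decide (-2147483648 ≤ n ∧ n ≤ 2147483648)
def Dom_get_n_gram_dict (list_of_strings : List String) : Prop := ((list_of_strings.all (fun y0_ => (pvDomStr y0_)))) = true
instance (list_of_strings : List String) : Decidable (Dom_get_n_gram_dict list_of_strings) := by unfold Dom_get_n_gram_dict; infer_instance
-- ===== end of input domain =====

-- B replaces A's per-word dict increments by a word-count histogram plus one descending
-- suffix-sum pass (faster in a timing run: O(n + max) vs O(sum of word counts)).


-- ===== PORT A =====
def get_n_gram_dict (list_of_strings : List String) : List (Int × Int) :=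
  (list_of_strings.foldl
    (fun n_gram_dict string =>
      (PySem.List.pyRange 1 (((PySem.Str.split₀ string).length : Int) + 1) 1).foldl
        (fun n_gram_dict i =>
          if n_gram_dict.contains i = false then n_gram_dict.insert i 1
          else n_gram_dict.insert i (n_gram_dict.getD i 0 + 1))
        n_gram_dict)
    (PySem.Dict.empty : PySem.Dict Int Int)).items

-- ===== PORT B =====
def get_n_gram_dict_alt (list_of_strings : List String) : List (Int × Int) :=
  let counts := list_of_strings.map (fun s => ((PySem.Str.split₀ s).length : Int))
  let m := counts.foldl (fun m c => if c > m then c else m) 0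
  let hist := counts.foldl (fun hist c => hist.insert c (hist.getD c 0 + 1))
      (PySem.Dict.empty : PySem.Dict Int Int)
  let p := (PySem.List.pyRange m 0 (-1)).foldl
      (fun (p : Int × List (Int × Int)) i =>
        (p.1 + hist.getD i 0, p.2 ++ [(i, p.1 + hist.getD i 0)]))
      (0, [])
  p.2.reverse

-- ===== PRECONDITION & SPEC =====
def Spec_get_n_gram_dict (list_of_strings : List String) (out : List (Int × Int)) : Prop := out = get_n_gram_dict_alt list_of_strings
instance (list_of_strings : List String) (out : List (Int × Int)) : Decidable (Spec_get_n_gram_dict list_of_strings out) := by unfold Spec_get_n_gram_dict; infer_instance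

-- ===== CLAIM (what is proved, stated in full; the proofs are below) =====
def Claim_equal_get_n_gram_dict : Prop := ∀ (list_of_strings : List String), Dom_get_n_gram_dict list_of_strings → Spec_get_n_gram_dict list_of_strings (get_n_gram_dict list_of_strings)

-- ===== LEMMAS AND PROOFS =====

-- word counts of the input, as Ints
def pvCounts (xs : List String) : List Int := xs.map (fun s => ((PySem.Str.split₀ s).length : Int))
-- running maximum (0-based)
def pvMax (ws : List Int) : Int := ws.foldl (fun m c => if c > m then c else m) 0
-- number of elements ≥ i
def pvCnt (ws : List Int) (i : Int) : Int := (ws.countP (fun c => i ≤ c) : Int)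
-- the common shape: keys a..b-1 with values f
def pvShaped (a b : Int) (f : Int → Int) : List (Int × Int) :=
  (PySem.List.pyRange a b 1).map (fun i => (i, f i))

theorem pvShaped_congr (a b : Int) (f g : Int → Int)
    (h : ∀ i, a ≤ i → i < b → f i = g i) : pvShaped a b f = pvShaped a b g := by
  unfold pvShaped
  refine List.map_congr_left ?_
  intro i hi
  rw [PySem.List.mem_pyRange_one] at hi
  exact congrArg _ (h i hi.1 hi.2)

theorem pvShaped_keys (a b : Int) (f : Int → Int) :
    (PySem.Dict.mk (pvShaped a b f)).keys = PySem.List.pyRange a b 1 := by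
  simp [pvShaped, PySem.Dict.keys, List.map_map, Function.comp_def]

theorem pvShaped_get? (a b : Int) (f : Int → Int) (x : Int) :
    (PySem.Dict.mk (pvShaped a b f)).get? x =
      if a ≤ x ∧ x < b then some (f x) else none := by
  by_cases h : a ≤ x ∧ x < b
  · rw [if_pos h]
    refine PySem.Dict.get?_of_mem_items _ ?_ ?_
    · show (x, f x) ∈ pvShaped a b f
      unfold pvShaped
      exact List.mem_map_of_mem (PySem.List.mem_pyRange_one.mpr h)
    · rw [pvShaped_keys]
      exact PySem.List.nodup_pyRange_one _ _
  · rw [if_neg h]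
    rw [PySem.Dict.get?_eq_none_iff_not_mem_keys, pvShaped_keys]
    intro hmem
    exact h (PySem.List.mem_pyRange_one.mp hmem)

theorem pvShaped_contains (a b : Int) (f : Int → Int) (x : Int) :
    (PySem.Dict.mk (pvShaped a b f)).contains x = decide (a ≤ x ∧ x < b) := by
  rw [PySem.Dict.contains_eq_isSome_get?, pvShaped_get?]
  by_cases h : a ≤ x ∧ x < b <;> simp [h]

theorem pvShaped_getD (a b : Int) (f : Int → Int) (x : Int) (h1 : a ≤ x) (h2 : x < b) :
    (PySem.Dict.mk (pvShaped a b f)).getD x 0 = f x := by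
  rw [PySem.Dict.getD_eq_get?_getD, pvShaped_get?, if_pos ⟨h1, h2⟩]
  rfl

theorem pvShaped_insert_mem (a b : Int) (f : Int → Int) (x v : Int) (h1 : a ≤ x) (h2 : x < b) :
    (PySem.Dict.mk (pvShaped a b f)).insert x v =
      PySem.Dict.mk (pvShaped a b (fun i => if i = x then v else f i)) := by
  apply PySem.Dict.ext
  rw [PySem.Dict.items_insert_of_contains]
  · show List.map _ (pvShaped a b f) = pvShaped a b _
    unfold pvShaped
    rw [List.map_map]
    refine List.map_congr_left ?_
    intro i _
    by_cases hi : i = x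
    · subst hi; simp
    · simp [hi]
  · rw [pvShaped_contains]
    simp [h1, h2]

theorem pvShaped_insert_fresh (a b : Int) (f : Int → Int) (v : Int) (h : a ≤ b) :
    (PySem.Dict.mk (pvShaped a b f)).insert b v =
      PySem.Dict.mk (pvShaped a (b + 1) (fun i => if i = b then v else f i)) := by
  apply PySem.Dict.ext
  rw [PySem.Dict.items_insert_of_not_contains]
  · show pvShaped a b f ++ [(b, v)] = pvShaped a (b + 1) _
    unfold pvShaped
    rw [PySem.List.pyRange_one_succ_right h, List.map_append]
    simp only [List.map_cons, List.map_nil, if_pos]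
    congr 1
    refine List.map_congr_left ?_
    intro i hi
    rw [PySem.List.mem_pyRange_one] at hi
    have : i ≠ b := by omega
    simp [this]
  · rw [pvShaped_contains]
    simp

-- max bounds
theorem pvMax_aux (ws : List Int) : ∀ (a : Int),
    a ≤ ws.foldl (fun m c => if c > m then c else m) a ∧
    ∀ c ∈ ws, c ≤ ws.foldl (fun m c => if c > m then c else m) a := by
  induction ws with
  | nil => intro a; simp
  | cons w t ih =>
    intro a
    simp only [List.foldl_cons, List.mem_cons]
    constructor
    · refine le_trans ?_ (ih (if w > a then w else a)).1
      split <;> omega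
    · intro c hc
      rcases hc with rfl | hc
      · refine le_trans ?_ (ih (if c > a then c else a)).1
        split <;> omega
      · exact (ih _).2 c hc

theorem pvMax_nonneg (ws : List Int) : 0 ≤ pvMax ws := by exact (pvMax_aux ws 0).1
theorem pvMax_bound (ws : List Int) (c : Int) (h : c ∈ ws) : c ≤ pvMax ws := by exact (pvMax_aux ws 0).2 c h
theorem pvMax_append (ws : List Int) (w : Int) :
    pvMax (ws ++ [w]) = if w > pvMax ws then w else pvMax ws := by
  unfold pvMax
  rw [List.foldl_append]
  rfl
theorem pvCnt_append (ws : List Int) (w i : Int) :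
    pvCnt (ws ++ [w]) i = pvCnt ws i + (if i ≤ w then 1 else 0) := by
  unfold pvCnt
  rw [List.countP_append]
  by_cases h : i ≤ w <;> simp [h]
theorem pvCnt_zero_of_gt (ws : List Int) (i : Int) (h : pvMax ws < i) : pvCnt ws i = 0 := by
  unfold pvCnt
  have : ws.countP (fun c => i ≤ c) = 0 := by
    rw [List.countP_eq_zero]
    intro c hc
    have := pvMax_bound ws c hc
    simp only [decide_eq_true_eq]
    omega
  rw [this]
  rfl
theorem pvCnt_succ (ws : List Int) (i : Int) :
    pvCnt ws i = (ws.count i : Int) + pvCnt ws (i + 1) := by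
  unfold pvCnt
  simp only [Int.add_one_le_iff]
  induction ws with
  | nil => simp
  | cons c t ih =>
    simp only [List.countP_cons, List.count_cons]
    push_cast at ih ⊢
    by_cases h1 : c = i <;> by_cases h2 : i ≤ c <;> by_cases h4 : i < c <;>
      simp only [h1, h2, h4, beq_iff_eq, decide_true, decide_false, if_true, if_false] <;>
      first | omega | (simp; omega)

-- A's inner loop on a shaped dict
theorem pvInner (wN : Nat) (m : Int) (f : Int → Int) (hm : 0 ≤ m) :
    (PySem.List.pyRange 1 ((wN : Int) + 1) 1).foldl
      (fun d i => if d.contains i = false then d.insert i 1 else d.insert i (d.getD i 0 + 1))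
      (PySem.Dict.mk (pvShaped 1 (m + 1) f)) =
    PySem.Dict.mk (pvShaped 1 (max m (wN : Int) + 1)
      (fun i => if i ≤ (wN : Int) then (if i ≤ m then f i + 1 else 1) else f i)) := by
  induction wN with
  | zero =>
    rw [PySem.List.pyRange_one_eq_nil (by omega)]
    simp only [List.foldl_nil, Nat.cast_zero]
    rw [max_eq_left hm]
    refine congrArg _ (pvShaped_congr _ _ _ _ ?_)
    intro i h1 h2
    have : ¬ (i ≤ (0 : Int)) := by omega
    rw [if_neg this]
  | succ n ih =>
    have hcast : ((n + 1 : Nat) : Int) + 1 = ((n : Int) + 1) + 1 := by push_cast; ring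
    rw [hcast, PySem.List.pyRange_one_succ_right (by omega), List.foldl_append, ih]
    simp only [List.foldl_cons, List.foldl_nil]
    push_cast
    by_cases hlt : (n : Int) < m
    · -- key n+1 already present: overwrite
      have hmax : max m (n : Int) = m := by omega
      have hc : (PySem.Dict.mk (pvShaped 1 (max m (n : Int) + 1) fun i =>
          if i ≤ (n : Int) then (if i ≤ m then f i + 1 else 1) else f i)).contains ((n : Int) + 1) = true := by
        rw [pvShaped_contains, hmax]
        simp only [decide_eq_true_eq]
        omega
      rw [hc]
      simp only [Bool.true_eq_false, if_false]
      rw [hmax]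
      rw [pvShaped_getD _ _ _ _ (by omega) (by omega)]
      rw [pvShaped_insert_mem _ _ _ _ _ (by omega) (by omega)]
      have hr : max m ((n : Int) + 1) = m := by omega
      rw [hr]
      refine congrArg _ (pvShaped_congr _ _ _ _ ?_)
      intro i h1 h2
      by_cases hi : i = (n : Int) + 1
      · subst hi
        rw [if_pos rfl, if_neg (by omega : ¬ ((n : Int) + 1 ≤ (n : Int))),
          if_pos (le_refl ((n : Int) + 1)), if_pos (by omega : (n : Int) + 1 ≤ m)]
      · rw [if_neg hi]
        by_cases h3 : i ≤ (n : Int)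
        · rw [if_pos h3, if_pos (by omega : i ≤ (n : Int) + 1)]
        · rw [if_neg h3, if_neg (by omega : ¬ i ≤ (n : Int) + 1)]
    · -- key n+1 is fresh: append
      have hmax : max m (n : Int) = (n : Int) := by omega
      have hc : (PySem.Dict.mk (pvShaped 1 (max m (n : Int) + 1) fun i =>
          if i ≤ (n : Int) then (if i ≤ m then f i + 1 else 1) else f i)).contains ((n : Int) + 1) = false := by
        rw [pvShaped_contains, hmax]
        simp only [decide_eq_false_iff_not]
        omega
      rw [hc]
      simp only [if_true]
      rw [hmax]
      rw [pvShaped_insert_fresh _ _ _ _ (by omega : (1 : Int) ≤ (n : Int) + 1)]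
      have hr : max m ((n : Int) + 1) = (n : Int) + 1 := by omega
      rw [hr]
      refine congrArg _ (pvShaped_congr _ _ _ _ ?_)
      intro i h1 h2
      by_cases hi : i = (n : Int) + 1
      · subst hi
        rw [if_pos rfl, if_pos (le_refl ((n : Int) + 1)), if_neg (by omega : ¬ ((n : Int) + 1 ≤ m))]
      · rw [if_neg hi]
        by_cases h3 : i ≤ (n : Int)
        · rw [if_pos h3, if_pos (by omega : i ≤ (n : Int) + 1)]
        · rw [if_neg h3, if_neg (by omega : ¬ i ≤ (n : Int) + 1)]


-- A's outer loop
theorem pvInner' (w m : Int) (f : Int → Int) (hw : 0 ≤ w) (hm : 0 ≤ m) :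
    (PySem.List.pyRange 1 (w + 1) 1).foldl
      (fun d i => if d.contains i = false then d.insert i 1 else d.insert i (d.getD i 0 + 1))
      (PySem.Dict.mk (pvShaped 1 (m + 1) f)) =
    PySem.Dict.mk (pvShaped 1 (max m w + 1)
      (fun i => if i ≤ w then (if i ≤ m then f i + 1 else 1) else f i)) := by
  have h := pvInner w.toNat m f hm
  rwa [Int.toNat_of_nonneg hw] at h

theorem pvA (ws : List Int) (hws : ∀ c ∈ ws, 0 ≤ c) :
    ws.foldl
      (fun d w => (PySem.List.pyRange 1 (w + 1) 1).foldl
        (fun d i => if d.contains i = false then d.insert i 1 else d.insert i (d.getD i 0 + 1)) d)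
      (PySem.Dict.empty : PySem.Dict Int Int) =
    PySem.Dict.mk (pvShaped 1 (pvMax ws + 1) (pvCnt ws)) := by
  induction ws using List.reverseRecOn with
  | nil =>
    simp only [List.foldl_nil]
    apply PySem.Dict.ext
    show ([] : List (Int × Int)) = pvShaped 1 (pvMax [] + 1) (pvCnt [])
    unfold pvShaped
    rw [show pvMax [] = 0 from rfl, PySem.List.pyRange_one_eq_nil (by omega)]
    rfl
  | append_singleton ws w ih =>
    have hw : 0 ≤ w := hws w (by simp)
    rw [List.foldl_append]
    simp only [List.foldl_cons, List.foldl_nil]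
    rw [ih (fun c hc => hws c (List.mem_append_left _ hc))]
    rw [pvInner' w (pvMax ws) (pvCnt ws) hw (pvMax_nonneg ws)]
    rw [pvMax_append]
    have hmx : (if w > pvMax ws then w else pvMax ws) = max (pvMax ws) w := by
      split <;> omega
    rw [hmx]
    refine congrArg _ (pvShaped_congr _ _ _ _ ?_)
    intro i h1 h2
    rw [pvCnt_append]
    by_cases hiw : i ≤ w
    · rw [if_pos hiw, if_pos hiw]
      by_cases him : i ≤ pvMax ws
      · rw [if_pos him]
      · rw [if_neg him, pvCnt_zero_of_gt ws i (by omega)]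
        omega
    · rw [if_neg hiw, if_neg hiw]
      omega

-- B's suffix-sum loop
theorem pvB (ws : List Int) (h : Int → Int) (hh : ∀ i, h i = (ws.count i : Int)) (mN : Nat)
    (s0 : Int) (acc : List (Int × Int)) :
    (PySem.List.pyRange (mN : Int) 0 (-1)).foldl
      (fun (p : Int × List (Int × Int)) i => (p.1 + h i, p.2 ++ [(i, p.1 + h i)]))
      (s0, acc) =
    (s0 + (pvCnt ws 1 - pvCnt ws ((mN : Int) + 1)),
     acc ++ (pvShaped 1 ((mN : Int) + 1)
       (fun i => s0 + (pvCnt ws i - pvCnt ws ((mN : Int) + 1)))).reverse) := by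
  induction mN generalizing s0 acc with
  | zero =>
    rw [Nat.cast_zero, PySem.List.pyRange_neg_one_eq_nil (by omega)]
    simp only [List.foldl_nil]
    unfold pvShaped
    rw [PySem.List.pyRange_one_eq_nil (by omega)]
    simp
  | succ n ih =>
    have hcast : ((n + 1 : Nat) : Int) = (n : Int) + 1 := by push_cast; ring
    rw [hcast, PySem.List.pyRange_neg_one_cons (by omega)]
    simp only [List.foldl_cons]
    rw [show (n : Int) + 1 - 1 = (n : Int) by ring]
    rw [ih]
    have hcnt := pvCnt_succ ws ((n : Int) + 1)
    have hha := hh ((n : Int) + 1)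
    rw [Prod.mk.injEq]
    constructor
    · omega
    · rw [List.append_assoc]
      congr 1
      unfold pvShaped
      rw [PySem.List.pyRange_one_succ_right (by omega : (1 : Int) ≤ (n : Int) + 1),
        List.map_append, List.reverse_append]
      simp only [List.map_cons, List.map_nil, List.reverse_cons, List.reverse_nil,
        List.nil_append, List.cons_append]
      congr 1
      · rw [Prod.mk.injEq]
        exact ⟨rfl, by omega⟩
      · congr 1
        refine List.map_congr_left ?_
        intro i hi
        have hv : s0 + h ((n : Int) + 1) + (pvCnt ws i - pvCnt ws ((n : Int) + 1)) =
            s0 + (pvCnt ws i - pvCnt ws ((n : Int) + 1 + 1)) := by omega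
        rw [hv]

theorem pvBridge (l : List String) (d : PySem.Dict Int Int) :
    l.foldl (fun n_gram_dict string =>
      (PySem.List.pyRange 1 (((PySem.Str.split₀ string).length : Int) + 1) 1).foldl
        (fun n_gram_dict i => if n_gram_dict.contains i = false then n_gram_dict.insert i 1
          else n_gram_dict.insert i (n_gram_dict.getD i 0 + 1)) n_gram_dict) d =
    (l.map (fun s => ((PySem.Str.split₀ s).length : Int))).foldl
      (fun d w => (PySem.List.pyRange 1 (w + 1) 1).foldl
        (fun d i => if d.contains i = false then d.insert i 1 else d.insert i (d.getD i 0 + 1)) d) d := by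
  induction l generalizing d with
  | nil => rfl
  | cons s t ih =>
    simp only [List.foldl_cons, List.map_cons]
    exact ih _

theorem pvAside (xs : List String) :
    get_n_gram_dict xs = pvShaped 1 (pvMax (pvCounts xs) + 1) (pvCnt (pvCounts xs)) := by
  unfold get_n_gram_dict
  rw [pvBridge]
  rw [pvA (xs.map (fun s => ((PySem.Str.split₀ s).length : Int)))
      (by intro c hc; obtain ⟨s, _, rfl⟩ := List.mem_map.mp hc; positivity)]
  rfl

theorem pvAlt (xs : List String) :
    get_n_gram_dict_alt xs = pvShaped 1 (pvMax (pvCounts xs) + 1) (pvCnt (pvCounts xs)) := by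
  unfold get_n_gram_dict_alt
  simp only []
  rw [show List.map (fun s => ((PySem.Str.split₀ s).length : Int)) xs = pvCounts xs from rfl]
  rw [show List.foldl (fun m c => if c > m then c else m) 0 (pvCounts xs) = pvMax (pvCounts xs) from rfl]
  rw [show (pvCounts xs).foldl (fun hist c => hist.insert c (hist.getD c 0 + 1))
        (PySem.Dict.empty : PySem.Dict Int Int) = PySem.Dict.counter (pvCounts xs)
      from PySem.Dict.foldl_insert_getD_add_one_eq_counter _]
  have hm0 : 0 ≤ pvMax (pvCounts xs) := pvMax_nonneg _
  have hM : pvMax (pvCounts xs) = (((pvMax (pvCounts xs)).toNat : Nat) : Int) :=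
    (Int.toNat_of_nonneg hm0).symm
  rw [hM]
  have hB := pvB (pvCounts xs) (fun i => (PySem.Dict.counter (pvCounts xs)).getD i 0)
      (fun i => PySem.Dict.getD_counter _ _) ((pvMax (pvCounts xs)).toNat) 0 []
  simp only [] at hB
  rw [hB]
  simp only [List.nil_append, List.reverse_reverse]
  refine pvShaped_congr _ _ _ _ ?_
  intro i h1 h2
  rw [pvCnt_zero_of_gt (pvCounts xs) ((((pvMax (pvCounts xs)).toNat : Nat) : Int) + 1) (by omega)]
  ring

-- ===== VERDICT (by name: the statement is the Claim_ definition above) =====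
theorem get_n_gram_dict_spec : Claim_equal_get_n_gram_dict := by
  intro xs _
  unfold Spec_get_n_gram_dict
  rw [pvAside, pvAlt]
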